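-- pv_equiv track=rewrite | github.com/insertgroupname/feedback-python-api-server | module/text_processor.py | count_hestiation
-- ===== SOURCE A (Python) =====
-- def count_hestiation(text_list):
--     counter = 0
--     txt_ = []
--     for i in text_list.split():
--         if i != "%HESITATION":
--             txt_.append(i)
--         else:
--             counter = counter + 1
--     return counter, txt_
-- ===== SOURCE B (Python) =====
-- def count_hestiation(text_list):
--     # Divide and conquer on the word list: solve halves recursively and
--     # combine (counts add, kept-word lists concatenate). Depth is O(log n).
--     def go(ws):
--         if not ws:
--             return 0, []
--         if len(ws) == 1:
--             return (1, []) if ws[0] == "%HESITATION" else (0, ws)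
--         m = len(ws) // 2
--         c1, l1 = go(ws[:m])
--         c2, l2 = go(ws[m:])
--         return c1 + c2, l1 + l2
--     return go(text_list.split())
-- ===== Notes on version B (the rewrite author's own statement) =====
-- stated objective: alternative
-- what changed: Replaces A's single left-to-right loop with two accumulators by a divide-and-conquer recursion: split the word list in halves, solve each half recursively, and combine by adding counts and concatenating kept-word lists.
import Mathlib
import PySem

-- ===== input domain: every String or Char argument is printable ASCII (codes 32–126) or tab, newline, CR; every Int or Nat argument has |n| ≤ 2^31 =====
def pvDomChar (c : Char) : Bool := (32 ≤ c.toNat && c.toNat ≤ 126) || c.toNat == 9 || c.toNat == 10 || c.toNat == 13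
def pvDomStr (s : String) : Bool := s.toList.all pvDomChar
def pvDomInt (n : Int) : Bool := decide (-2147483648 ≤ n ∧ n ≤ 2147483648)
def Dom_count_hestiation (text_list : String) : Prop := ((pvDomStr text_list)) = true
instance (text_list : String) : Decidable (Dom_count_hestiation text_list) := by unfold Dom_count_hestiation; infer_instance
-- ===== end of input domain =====

-- B replaces A's single accumulating loop by a divide-and-conquer recursion on the word list (alternative decomposition, not faster).

-- ===== PORT A =====
-- literal transliteration of A: one pass over the split words, branching on each word
def count_hestiation (text_list : String) : Int × List String :=
  (PySem.Str.split₀ text_list).foldl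
    (fun st i => if i ≠ "%HESITATION" then (st.1, st.2 ++ [i]) else (st.1 + 1, st.2))
    ((0 : Int), ([] : List String))

-- ===== PORT B =====
-- helper 'go' of Source B: divide and conquer on the word list
def count_hestiation_go : List String → Int × List String
  | [] => (0, [])
  | [w] => if w = "%HESITATION" then (1, []) else (0, [w])
  | w1 :: w2 :: rest =>
      let ws := w1 :: w2 :: rest
      let m := ws.length / 2
      let r1 := count_hestiation_go (ws.take m)
      let r2 := count_hestiation_go (ws.drop m)
      (r1.1 + r2.1, r1.2 ++ r2.2)
  termination_by ws => ws.length
  decreasing_by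
    · simp [List.length_take]; omega
    · simp; omega

def count_hestiation_alt (text_list : String) : Int × List String :=
  count_hestiation_go (PySem.Str.split₀ text_list)

-- ===== PRECONDITION & SPEC =====
def Spec_count_hestiation (text_list : String) (out : Int × List String) : Prop := out = count_hestiation_alt text_list
instance (text_list : String) (out : Int × List String) : Decidable (Spec_count_hestiation text_list out) := by unfold Spec_count_hestiation; infer_instance

-- ===== CLAIM =====
def Claim_equal_count_hestiation : Prop := ∀ (text_list : String), Dom_count_hestiation text_list → Spec_count_hestiation text_list (count_hestiation text_list)

-- ===== LEMMAS AND PROOFS =====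
-- A's fold computes (count of "%HESITATION", filtered list)
theorem fold_eq (ws : List String) (c : Int) (acc : List String) :
    ws.foldl (fun st i => if i ≠ "%HESITATION" then (st.1, st.2 ++ [i]) else (st.1 + 1, st.2)) (c, acc)
      = (c + ((ws.length : Int) - ((ws.filter (fun w => w ≠ "%HESITATION")).length : Int)),
         acc ++ ws.filter (fun w => w ≠ "%HESITATION")) := by
  induction ws generalizing c acc with
  | nil => simp
  | cons h t ih =>
    rw [List.foldl_cons]
    by_cases hh : h = "%HESITATION"
    · rw [if_neg (by simp [hh]), ih]
      simp [hh]; ring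
    · rw [if_pos (by simp [hh]), ih]
      simp [hh]

-- B's divide-and-conquer computes the same pair
theorem go_eq (ws : List String) :
    count_hestiation_go ws
      = (((ws.length : Int) - ((ws.filter (fun w => w ≠ "%HESITATION")).length : Int)),
         ws.filter (fun w => w ≠ "%HESITATION")) := by
  induction ws using count_hestiation_go.induct with
  | case1 => simp [count_hestiation_go]
  | case2 => simp [count_hestiation_go]
  | case3 w hw => simp [count_hestiation_go, hw]
  | case4 w1 w2 rest ws m ih1 ih2 =>
    simp only [ws, m] at ih1 ih2
    rw [count_hestiation_go]
    rw [ih1, ih2]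
    have hsplit : ((w1 :: w2 :: rest).take ((w1 :: w2 :: rest).length / 2)).filter (fun w => w ≠ "%HESITATION")
        ++ ((w1 :: w2 :: rest).drop ((w1 :: w2 :: rest).length / 2)).filter (fun w => w ≠ "%HESITATION")
        = (w1 :: w2 :: rest).filter (fun w => w ≠ "%HESITATION") := by
      rw [← List.filter_append, List.take_append_drop]
    simp only [Prod.mk.injEq]
    constructor
    · have h1 : ((w1 :: w2 :: rest).take ((w1 :: w2 :: rest).length / 2)).length
          + ((w1 :: w2 :: rest).drop ((w1 :: w2 :: rest).length / 2)).length
          = (w1 :: w2 :: rest).length := by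
        rw [← List.length_append, List.take_append_drop]
      have h3 := congrArg List.length hsplit
      rw [List.length_append] at h3
      omega
    · exact hsplit

-- ===== VERDICT =====
theorem count_hestiation_spec : Claim_equal_count_hestiation := by
  intro t _
  unfold Spec_count_hestiation count_hestiation count_hestiation_alt
  rw [fold_eq, go_eq]
  simp
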